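-- pv_equiv track=rewrite | github.com/Falaksher43/RN-Sample | analysis/a_general.py | dyslexic_flip_match
-- ===== SOURCE A (Python) =====
-- import copy
--
-- def dyslexic_flip_match(a, b):
--     """
--     See if the two strings are one dyslexic vertical flip mistake away from correct
--     """
--     #     todo: count how many dyslexic flips are needed to make them match rather than True/False
--     if len(a) != len(b):
--         return False
--     if a == b:
--         return False
--
--     dyslexic_map = {'9': '6',
--                     '6': '9'}
--
--     for ii in range(len(a)):
--         # using copy here so as not to mutate original string
--         a2 = list(copy.deepcopy(a))
--         if a[ii] in dyslexic_map:
--             a2[ii] = dyslexic_map[a[ii]]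
--
--         if ''.join(a2) == b:
--             return True
--
--     return False
-- ===== SOURCE B (Python) =====
-- def dyslexic_flip_match(a, b):
--     if len(a) != len(b):
--         return False
--     diffs = [(x, y) for x, y in zip(a, b) if x != y]
--     return len(diffs) == 1 and diffs[0] in (('9', '6'), ('6', '9'))
-- ===== Notes on version B (the rewrite author's own statement) =====
-- stated objective: faster
-- what changed: Replaced the loop that rebuilds and compares a whole flipped copy of the string at every position (O(n^2)) by a single zip pass collecting the differing positions and requiring exactly one 9/6-flippable difference (O(n)).
import Mathlib
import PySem

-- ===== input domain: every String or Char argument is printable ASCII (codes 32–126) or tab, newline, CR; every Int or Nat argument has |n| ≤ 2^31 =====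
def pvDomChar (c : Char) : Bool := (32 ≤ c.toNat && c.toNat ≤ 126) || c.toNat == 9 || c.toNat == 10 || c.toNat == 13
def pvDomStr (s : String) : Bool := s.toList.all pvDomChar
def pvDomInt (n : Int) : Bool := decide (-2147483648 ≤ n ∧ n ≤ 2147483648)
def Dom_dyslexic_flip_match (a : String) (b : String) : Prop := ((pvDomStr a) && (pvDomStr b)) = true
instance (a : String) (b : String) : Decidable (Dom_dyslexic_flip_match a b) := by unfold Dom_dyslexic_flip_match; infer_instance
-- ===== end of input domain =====

-- B replaces A's per-position rebuild-and-compare of a flipped copy of the string (quadratic work)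
-- by one zip pass collecting the differing positions and requiring exactly one 9/6-flippable difference.

-- ===== PORT A =====
-- the literal dict {'9': '6', '6': '9'}
def pvDmap : PySem.Dict Char Char := PySem.Dict.ofList [('9', '6'), ('6', '9')]

-- one iteration body of A's loop: copy a, flip position i if a[i] is in the map
-- (i always comes from range(len(a)), so plain getD is exact here)
def pvFlipAt (la : List Char) (i : Nat) : List Char :=
  match pvDmap.get? (la.getD i ' ') with
  | some v => la.set i v
  | none => la

-- A's `for ii in range(len(a))` with early return on `''.join(a2) == b`
def pvLoopA (la lb : List Char) : List Nat → Bool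
  | [] => false
  | i :: rest => if pvFlipAt la i = lb then true else pvLoopA la lb rest

def dyslexic_flip_match (a : String) (b : String) : Bool :=
  if a.toList.length ≠ b.toList.length then false
  else if a.toList = b.toList then false
  else pvLoopA a.toList b.toList (List.range a.toList.length)

-- ===== PORT B =====
-- `diffs[0] in (('9','6'),('6','9'))`
def pvFlippable (x y : Char) : Bool := (x == '9' && y == '6') || (x == '6' && y == '9')

-- `diffs = [...zip...]; len(diffs) == 1 and diffs[0] in (('9','6'),('6','9'))`
def pvAltCore (la lb : List Char) : Bool :=
  match (la.zip lb).filter (fun p => p.1 != p.2) with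
  | [(x, y)] => pvFlippable x y
  | _ => false

def dyslexic_flip_match_alt (a : String) (b : String) : Bool :=
  if a.toList.length ≠ b.toList.length then false
  else pvAltCore a.toList b.toList

-- ===== PRECONDITION & SPEC =====
def Spec_dyslexic_flip_match (a : String) (b : String) (out : Bool) : Prop := out = dyslexic_flip_match_alt a b
instance (a : String) (b : String) (out : Bool) : Decidable (Spec_dyslexic_flip_match a b out) := by unfold Spec_dyslexic_flip_match; infer_instance

-- ===== CLAIM (what is proved, stated in full; the proofs are below) =====
def Claim_equal_dyslexic_flip_match : Prop := ∀ (a : String) (b : String), Dom_dyslexic_flip_match a b → Spec_dyslexic_flip_match a b (dyslexic_flip_match a b)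

-- ===== LEMMAS AND PROOFS =====

lemma pvDmap_get (c : Char) :
    pvDmap.get? c = if c = '9' then some '6' else if c = '6' then some '9' else none := by
  by_cases h9 : c = '9'
  · subst h9; rfl
  · by_cases h6 : c = '6'
    · subst h6; rfl
    · have h : pvDmap = PySem.Dict.mk [('9', '6'), ('6', '9')] := rfl
      rw [h]
      simp [Ne.symm h9, Ne.symm h6, PySem.Dict.get?, h9, h6]

lemma pvLoopA_eq_any (la lb : List Char) (l : List Nat) :
    pvLoopA la lb l = l.any (fun i => decide (pvFlipAt la i = lb)) := by
  induction l with
  | nil => rfl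
  | cons i rest ih =>
    simp only [pvLoopA, List.any_cons, ih]
    split_ifs with h <;> simp [h]

lemma pvFilter_nil_iff (la lb : List Char) (h : la.length = lb.length) :
    (la.zip lb).filter (fun p => p.1 != p.2) = [] ↔ la = lb := by
  induction la generalizing lb with
  | nil =>
    cases lb with
    | nil => simp
    | cons d lb' => simp at h
  | cons c la' ih =>
    cases lb with
    | nil => simp at h
    | cons d lb' =>
      simp at h
      by_cases hcd : c = d
      · subst hcd; simp [ih lb' h]
      · simp [hcd]

lemma pvFlipAt_cons_succ (c : Char) (la : List Char) (i : Nat) :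
    pvFlipAt (c :: la) (i + 1) = c :: pvFlipAt la i := by
  simp only [pvFlipAt, List.getD, List.getElem?_cons_succ]
  cases pvDmap.get? ((la[i]?).getD ' ') <;> simp

lemma pvMain (la lb : List Char) (hlen : la.length = lb.length) (hne : la ≠ lb) :
    (List.range la.length).any (fun i => decide (pvFlipAt la i = lb)) = pvAltCore la lb := by
  induction la generalizing lb with
  | nil =>
    cases lb with
    | nil => exact absurd rfl hne
    | cons d lb' => simp at hlen
  | cons c la' ih =>
    cases lb with
    | nil => simp at hlen
    | cons d lb' =>
      simp only [List.length_cons] at hlen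
      have hlen' : la'.length = lb'.length := by omega
      rw [show (c :: la').length = la'.length + 1 from rfl, List.range_succ_eq_map,
        List.any_cons, List.any_map]
      have hsucc : (fun i => decide (pvFlipAt (c :: la') (Nat.succ i) = d :: lb')) =
          (fun i => decide (c = d) && decide (pvFlipAt la' i = lb')) := by
        funext i
        rw [pvFlipAt_cons_succ]
        simp
      rw [Function.comp_def, hsucc]
      by_cases hcd : c = d
      · subst hcd
        have hne' : la' ≠ lb' := fun h => hne (by rw [h])
        have h0 : decide (pvFlipAt (c :: la') 0 = c :: lb') = false := by
          by_cases h9 : c = '9'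
          · subst h9; simp [pvFlipAt, pvDmap_get]
          · by_cases h6 : c = '6'
            · subst h6; simp [pvFlipAt, pvDmap_get]
            · simp [pvFlipAt, pvDmap_get, h9, h6, hne']
        have hAlt : pvAltCore (c :: la') (c :: lb') = pvAltCore la' lb' := by
          simp [pvAltCore]
        rw [h0, hAlt, Bool.false_or]
        simp only [decide_true, Bool.true_and]
        exact ih lb' hlen' hne'
      · have hz : ((List.range la'.length).any
            (fun i => decide (c = d) && decide (pvFlipAt la' i = lb'))) = false := by
          simp [hcd]
        rw [hz, Bool.or_false]
        by_cases hT : la' = lb'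
        · subst hT
          have hf : (la'.zip la').filter (fun p => p.1 != p.2) = [] :=
            (pvFilter_nil_iff la' la' rfl).mpr rfl
          have hAlt : pvAltCore (c :: la') (d :: la') = pvFlippable c d := by
            simp [pvAltCore, hcd, hf]
          rw [hAlt]
          by_cases h9 : c = '9'
          · subst h9
            by_cases hd : d = '6'
            · subst hd; simp [pvFlipAt, pvDmap_get, pvFlippable]
            · simp [pvFlipAt, pvDmap_get, pvFlippable, hd, Ne.symm hd]
          · by_cases h6 : c = '6'
            · subst h6
              by_cases hd : d = '9'
              · subst hd; simp [pvFlipAt, pvDmap_get, pvFlippable]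
              · simp [pvFlipAt, pvDmap_get, pvFlippable, h9, hd, Ne.symm hd]
            · simp [pvFlipAt, pvDmap_get, pvFlippable, h9, h6, hcd]
        · have hf : (la'.zip lb').filter (fun p => p.1 != p.2) ≠ [] :=
            fun h => hT ((pvFilter_nil_iff la' lb' hlen').mp h)
          have hAlt : pvAltCore (c :: la') (d :: lb') = false := by
            simp only [pvAltCore, List.zip_cons_cons, List.filter_cons]
            cases hfe : (la'.zip lb').filter (fun p => p.1 != p.2) with
            | nil => exact absurd hfe hf
            | cons p rest => simp [hcd]
          rw [hAlt]
          by_cases h9 : c = '9'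
          · subst h9; simp [pvFlipAt, pvDmap_get, hT]
          · by_cases h6 : c = '6'
            · subst h6; simp [pvFlipAt, pvDmap_get, hT, h9]
            · simp [pvFlipAt, pvDmap_get, h9, h6, hcd]

-- ===== VERDICT (by name: the statement is the Claim_ definition above) =====
theorem dyslexic_flip_match_spec : Claim_equal_dyslexic_flip_match := by
  intro a b _
  unfold Spec_dyslexic_flip_match dyslexic_flip_match dyslexic_flip_match_alt
  by_cases hlen : a.toList.length ≠ b.toList.length
  · rw [if_pos hlen, if_pos hlen]
  · rw [if_neg hlen, if_neg hlen]
    rw [not_not] at hlen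
    by_cases heq : a.toList = b.toList
    · rw [if_pos heq]
      have hf : (a.toList.zip b.toList).filter (fun p => p.1 != p.2) = [] :=
        (pvFilter_nil_iff _ _ hlen).mpr heq
      simp [pvAltCore, hf]
    · rw [if_neg heq, pvLoopA_eq_any]
      exact pvMain a.toList b.toList hlen heq
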